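-- pv_equiv track=rewrite | github.com/DFIRKuiper/Kuiper | kuiper/app/parsers/JumpListLnk/JLParser.py | get_file_attr_flags
-- ===== SOURCE A (Python) =====
-- def get_file_attr_flags(data_flag_bytes):
--     flags = {
--         0x00000001:    'FILE_ATTRIBUTE_READONLY',
--         0x00000002:    'FILE_ATTRIBUTE_HIDDEN',
--         0x00000004:    'FILE_ATTRIBUTE_SYSTEM',
--         0x00000008:    'Unknown',
--         0x00000010:    'FILE_ATTRIBUTE_DIRECTORY',
--         0x00000020:    'FILE_ATTRIBUTE_ARCHIVE',
--         0x00000040:    'FILE_ATTRIBUTE_DEVICE',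
--         0x00000080:    'FILE_ATTRIBUTE_NORMAL',
--         0x00000100:    'FILE_ATTRIBUTE_TEMPORARY',
--         0x00000200:    'FILE_ATTRIBUTE_SPARSE_FILE',
--         0x00000400:    'FILE_ATTRIBUTE_REPARSE_POINT',
--         0x00000800:    'FILE_ATTRIBUTE_COMPRESSED',
--         0x00001000:    'FILE_ATTRIBUTE_OFFLINE',
--         0x00002000:    'FILE_ATTRIBUTE_NOT_CONTENT_INDEXED',
--         0x00004000:    'FILE_ATTRIBUTE_ENCRYPTED',
--         0x00008000:    'Unknown',
--         0x00010000:    'FILE_ATTRIBUTE_VIRTUAL'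
--     }
--
--     setFlags = []
--     for f in flags.keys():
--         if f & data_flag_bytes == f:
--             setFlags.append(flags[f])
--
--     return ','.join(setFlags)
-- ===== SOURCE B (Python) =====
-- def get_file_attr_flags(data_flag_bytes):
--     # mask -> name lookup table (the loop below is driven by the SET BITS of the
--     # input, not by this table; the table is only consulted per extracted bit)
--     flags = {
--         0x00000001:    'FILE_ATTRIBUTE_READONLY',
--         0x00000002:    'FILE_ATTRIBUTE_HIDDEN',
--         0x00000004:    'FILE_ATTRIBUTE_SYSTEM',
--         0x00000008:    'Unknown',
--         0x00000010:    'FILE_ATTRIBUTE_DIRECTORY',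
--         0x00000020:    'FILE_ATTRIBUTE_ARCHIVE',
--         0x00000040:    'FILE_ATTRIBUTE_DEVICE',
--         0x00000080:    'FILE_ATTRIBUTE_NORMAL',
--         0x00000100:    'FILE_ATTRIBUTE_TEMPORARY',
--         0x00000200:    'FILE_ATTRIBUTE_SPARSE_FILE',
--         0x00000400:    'FILE_ATTRIBUTE_REPARSE_POINT',
--         0x00000800:    'FILE_ATTRIBUTE_COMPRESSED',
--         0x00001000:    'FILE_ATTRIBUTE_OFFLINE',
--         0x00002000:    'FILE_ATTRIBUTE_NOT_CONTENT_INDEXED',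
--         0x00004000:    'FILE_ATTRIBUTE_ENCRYPTED',
--         0x00008000:    'Unknown',
--         0x00010000:    'FILE_ATTRIBUTE_VIRTUAL'
--     }
--     # restrict to the table's mask range, then repeatedly extract and clear the
--     # lowest set bit; every such bit is a key of the table, in ascending order
--     m = data_flag_bytes & 0x1FFFF
--     names = []
--     while m:
--         low = m & -m          # lowest set bit of m
--         names.append(flags[low])
--         m &= m - 1            # clear that bit
--     return ','.join(names)
-- ===== Notes on version B (the rewrite author's own statement) =====
-- stated objective: alternative
-- what changed: A folds over the whole fixed mask->name table testing every mask against the input; B instead masks the input to the table's range and loops over the input's SET BITS only, repeatedly extracting the lowest set bit, looking its name up in the table, and clearing it, so the loop is driven by the data, runs popcount-many times, and the dict is a pure lookup table.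
import Mathlib
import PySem

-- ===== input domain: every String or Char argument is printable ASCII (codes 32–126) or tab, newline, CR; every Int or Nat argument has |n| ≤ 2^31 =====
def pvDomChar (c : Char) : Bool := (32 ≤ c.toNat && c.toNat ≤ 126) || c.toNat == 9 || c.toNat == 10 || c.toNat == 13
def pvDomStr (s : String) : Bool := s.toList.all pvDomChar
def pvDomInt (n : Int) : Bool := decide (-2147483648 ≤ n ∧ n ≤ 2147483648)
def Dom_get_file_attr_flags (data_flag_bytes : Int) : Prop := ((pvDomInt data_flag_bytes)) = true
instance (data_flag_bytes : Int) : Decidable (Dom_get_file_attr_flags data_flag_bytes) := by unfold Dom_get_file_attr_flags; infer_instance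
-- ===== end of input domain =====

-- B replaces A's pass over the whole 17-entry mask→name table by a loop over the SET BITS of the
-- input only: mask to the table's range, then repeatedly extract the lowest set bit (m & -m),
-- look its name up in the table, and clear it (m &= m - 1); alternative decomposition, same output.

-- ===== PORT A =====
-- A's dict literal, in insertion order (keys are the masks 1 << 0 .. 1 << 16)
def jlAttrFlags : List (Int × String) := [
  (0x00000001, "FILE_ATTRIBUTE_READONLY"),
  (0x00000002, "FILE_ATTRIBUTE_HIDDEN"),
  (0x00000004, "FILE_ATTRIBUTE_SYSTEM"),
  (0x00000008, "Unknown"),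
  (0x00000010, "FILE_ATTRIBUTE_DIRECTORY"),
  (0x00000020, "FILE_ATTRIBUTE_ARCHIVE"),
  (0x00000040, "FILE_ATTRIBUTE_DEVICE"),
  (0x00000080, "FILE_ATTRIBUTE_NORMAL"),
  (0x00000100, "FILE_ATTRIBUTE_TEMPORARY"),
  (0x00000200, "FILE_ATTRIBUTE_SPARSE_FILE"),
  (0x00000400, "FILE_ATTRIBUTE_REPARSE_POINT"),
  (0x00000800, "FILE_ATTRIBUTE_COMPRESSED"),
  (0x00001000, "FILE_ATTRIBUTE_OFFLINE"),
  (0x00002000, "FILE_ATTRIBUTE_NOT_CONTENT_INDEXED"),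
  (0x00004000, "FILE_ATTRIBUTE_ENCRYPTED"),
  (0x00008000, "Unknown"),
  (0x00010000, "FILE_ATTRIBUTE_VIRTUAL")]

-- for f in flags.keys(): if f & data_flag_bytes == f: setFlags.append(flags[f]); return ','.join(setFlags)
def get_file_attr_flags (data_flag_bytes : Int) : String :=
  let setFlags := jlAttrFlags.foldl
    (fun acc p => if PySem.Int.band p.1 data_flag_bytes == p.1 then acc ++ [p.2] else acc) []
  PySem.Str.join "," setFlags

-- ===== PORT B =====
-- B's mask → name lookup table (Source B's 'flags' dict)
def jlFlagDict : PySem.Dict Int String := PySem.Dict.ofList [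
  (0x00000001, "FILE_ATTRIBUTE_READONLY"),
  (0x00000002, "FILE_ATTRIBUTE_HIDDEN"),
  (0x00000004, "FILE_ATTRIBUTE_SYSTEM"),
  (0x00000008, "Unknown"),
  (0x00000010, "FILE_ATTRIBUTE_DIRECTORY"),
  (0x00000020, "FILE_ATTRIBUTE_ARCHIVE"),
  (0x00000040, "FILE_ATTRIBUTE_DEVICE"),
  (0x00000080, "FILE_ATTRIBUTE_NORMAL"),
  (0x00000100, "FILE_ATTRIBUTE_TEMPORARY"),
  (0x00000200, "FILE_ATTRIBUTE_SPARSE_FILE"),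
  (0x00000400, "FILE_ATTRIBUTE_REPARSE_POINT"),
  (0x00000800, "FILE_ATTRIBUTE_COMPRESSED"),
  (0x00001000, "FILE_ATTRIBUTE_OFFLINE"),
  (0x00002000, "FILE_ATTRIBUTE_NOT_CONTENT_INDEXED"),
  (0x00004000, "FILE_ATTRIBUTE_ENCRYPTED"),
  (0x00008000, "Unknown"),
  (0x00010000, "FILE_ATTRIBUTE_VIRTUAL")]

-- termination of the peel loop: m &= m - 1 strictly shrinks a positive m
theorem pvPeelDec (m : Int) (h : ¬ m ≤ 0) : (PySem.Int.band m (m - 1)).toNat < m.toNat := by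
  have h0 : (0 : Int) < m := by omega
  rw [PySem.Int.band_of_nonneg (by omega) (by omega), Int.toNat_natCast]
  have h1 : m.toNat &&& (m - 1).toNat ≤ (m - 1).toNat := Nat.and_le_right
  omega

-- Source B's while loop:  while m: low = m & -m; names.append(flags[low]); m &= m - 1
-- ('m ≤ 0' rather than 'm == 0' only makes the recursion total; m here is always ≥ 0, and
--  flags[low] never misses since low is always one of the 17 mask keys, so getD "" is exact)
def peelNames (m : Int) : List String :=
  if h : m ≤ 0 then []
  else (jlFlagDict.getD (PySem.Int.band m (-m)) "") :: peelNames (PySem.Int.band m (m - 1))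
termination_by m.toNat
decreasing_by exact pvPeelDec m h

-- m = data_flag_bytes & 0x1FFFF; …peel loop…; return ','.join(names)
def get_file_attr_flags_alt (data_flag_bytes : Int) : String :=
  PySem.Str.join "," (peelNames (PySem.Int.band data_flag_bytes 0x1FFFF))

-- ===== PRECONDITION & SPEC =====
def Spec_get_file_attr_flags (data_flag_bytes : Int) (out : String) : Prop := out = get_file_attr_flags_alt data_flag_bytes
instance (data_flag_bytes : Int) (out : String) : Decidable (Spec_get_file_attr_flags data_flag_bytes out) := by unfold Spec_get_file_attr_flags; infer_instance

-- ===== CLAIM (what is proved, stated in full; the proofs are below) =====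
def Claim_equal_get_file_attr_flags : Prop := ∀ (data_flag_bytes : Int), Dom_get_file_attr_flags data_flag_bytes → Spec_get_file_attr_flags data_flag_bytes (get_file_attr_flags data_flag_bytes)

-- ===== LEMMAS AND PROOFS =====

-- the 17 flag names by bit position, and the low 17 bits of the input as a Nat
def pvNames : List String := jlAttrFlags.map (·.2)
def pvNameAt (i : Nat) : String := pvNames.getD i ""
def pvLow17 (d : Int) : Nat := (PySem.Int.band d 131071).toNat

-- Python's a & b for a ≥ 0 > b, on the representation Int.negSucc
theorem pv_band_negSucc (a b : Nat) : PySem.Int.band (↑a) (Int.negSucc b) = ↑(a - (a &&& b)) := by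
  have h : ¬ (0 ≤ Int.negSucc b) := Int.not_le.mpr (Int.negSucc_lt_zero b)
  have e : (-(Int.negSucc b) - 1) = (b : Int) := by simp [Int.negSucc_eq]
  simp only [PySem.Int.band, if_pos (Int.natCast_nonneg a), if_neg h, e, Int.toNat_natCast]

-- Nat.land on the binary digit decomposition
theorem pv_landD (m n b1 b2 : Nat) (h1 : b1 < 2) (h2 : b2 < 2) :
    ((2*m + b1) &&& (2*n + b2)) = 2*(m &&& n) + (b1 &&& b2) := by
  have hb : b1 &&& b2 < 2 := by interval_cases b1 <;> interval_cases b2 <;> decide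
  apply Nat.eq_of_testBit_eq
  intro i
  cases i with
  | zero =>
      simp only [Nat.testBit_zero]
      interval_cases b1 <;> interval_cases b2 <;> simp
  | succ j =>
      have e1 : (2*m + b1)/2 = m := by omega
      have e2 : (2*n + b2)/2 = n := by omega
      have e3 : (2*(m &&& n) + (b1 &&& b2))/2 = m &&& n := by omega
      rw [Nat.testBit_and, Nat.testBit_add_one, Nat.testBit_add_one, Nat.testBit_add_one,
          e1, e2, e3, ← Nat.testBit_and]

-- m & (m-1) clears the lowest set bit: for odd a, (a·2^i) & (a·2^i − 1) = (a−1)·2^i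
theorem pv_clearLow (i : Nat) : ∀ a : Nat, a % 2 = 1 → (a * 2^i) &&& (a * 2^i - 1) = (a - 1) * 2^i := by
  induction i with
  | zero =>
      intro a ha
      obtain ⟨b, rfl⟩ : ∃ b, a = 2*b + 1 := ⟨a/2, by omega⟩
      have h := pv_landD b b 1 0 (by omega) (by omega)
      simp only [pow_zero, mul_one]
      have e : 2*b + 1 - 1 = 2*b + 0 := by omega
      rw [e, h, Nat.and_self]; simp
  | succ j ih =>
      intro a ha
      have ha' : 0 < a := by omega
      have hx1 : 1 ≤ a * 2^j := Nat.mul_pos ha' (by positivity)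
      have hx : a * 2^(j+1) = 2*(a * 2^j) := by ring
      have hy : 2*(a * 2^j) - 1 = 2*(a*2^j - 1) + 1 := by omega
      rw [hx, hy, show (2*(a*2^j) : Nat) = 2*(a*2^j)+0 from (Nat.add_zero _).symm,
          pv_landD _ _ 0 1 (by omega) (by omega), ih a ha]
      have h01 : (0 &&& 1) = 0 := by decide
      rw [h01]; ring

-- bits of the t-bit complement 2^t − 1 − r
theorem pv_subComplTestBit : ∀ (t : Nat) (r : Nat), r < 2^t → ∀ i,
    (2^t - 1 - r).testBit i = (decide (i < t) && !(r.testBit i)) := by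
  intro t
  induction t with
  | zero => intro r hr i; interval_cases r; simp
  | succ u ih =>
      intro r hr i
      obtain ⟨q, b, hb, rfl⟩ : ∃ q b, b < 2 ∧ r = 2*q + b := ⟨r/2, r%2, by omega, by omega⟩
      have hq : q < 2^u := by
        have : (2:Nat)^(u+1) = 2*2^u := by ring
        omega
      have hv : 2^(u+1) - 1 - (2*q + b) = 2*(2^u - 1 - q) + (1 - b) := by
        have : (2:Nat)^(u+1) = 2*2^u := by ring
        omega
      rw [hv]
      cases i with
      | zero =>
          simp only [Nat.testBit_zero]
          interval_cases b <;> simp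
      | succ j =>
          rw [Nat.testBit_add_one, Nat.testBit_add_one]
          have e1 : (2*(2^u - 1 - q) + (1 - b))/2 = 2^u - 1 - q := by omega
          have e2 : (2*q + b)/2 = q := by omega
          rw [e1, e2, ih q hq j]
          simp

-- the masked input is the nonnegative value pvLow17 d < 2^17
theorem pv_low17_eq (d : Int) : PySem.Int.band d 131071 = ↑(pvLow17 d) := by
  have : 0 ≤ PySem.Int.band d 131071 := by
    rw [PySem.Int.band_comm]
    exact PySem.Int.band_nonneg_of_nonneg_left (a := 131071) d (by norm_num)
  unfold pvLow17; omega

theorem pv_low17_lt (d : Int) : pvLow17 d < 131072 := by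
  unfold pvLow17
  cases d with
  | ofNat m =>
      rw [show Int.ofNat m = ((m:Nat):Int) from rfl,
          show (131071 : Int) = ((131071:Nat):Int) from rfl, PySem.Int.band_natCast,
          Int.toNat_natCast]
      have : m &&& 131071 ≤ 131071 := Nat.and_le_right
      omega
  | negSucc k =>
      rw [PySem.Int.band_comm, show (131071 : Int) = ((131071:Nat):Int) from rfl,
          pv_band_negSucc, Int.toNat_natCast]
      omega

-- bit i of the masked input, i < 17, is exactly A's membership test 2^i & d == 2^i
theorem pv_test (d : Int) (i : Nat) (hi : i < 17) :
    (PySem.Int.band (2^i : Int) d = (2^i : Int)) ↔ (pvLow17 d).testBit i = true := by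
  have hcast : ((2:Int) ^ i) = ((2 ^ i : Nat) : Int) := by norm_cast
  have h17 : (131071 : Nat) = 2^17 - 1 := by norm_num
  have hm : ∀ j, (131071 : Nat).testBit j = decide (j < 17) := by
    intro j
    have := pv_subComplTestBit 17 0 (by norm_num) j
    norm_num at this
    rw [h17]
    exact this
  cases d with
  | ofNat m =>
      have hL : pvLow17 (Int.ofNat m) = m &&& 131071 := by
        unfold pvLow17
        rw [show Int.ofNat m = ((m:Nat):Int) from rfl,
            show (131071 : Int) = ((131071:Nat):Int) from rfl, PySem.Int.band_natCast,
            Int.toNat_natCast]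
      have h2 : 0 < 2^i := Nat.two_pow_pos i
      rw [hL, hcast, show Int.ofNat m = ((m:Nat):Int) from rfl, PySem.Int.band_natCast,
          Nat.testBit_and, hm i, decide_eq_true hi, Bool.and_true, Nat.two_pow_and]
      rcases hb : m.testBit i with _|_ <;> simp
      omega
  | negSucc k =>
      have hL : pvLow17 (Int.negSucc k) = 131071 - (131071 &&& k) := by
        unfold pvLow17
        rw [PySem.Int.band_comm, show (131071 : Int) = ((131071:Nat):Int) from rfl,
            pv_band_negSucc, Int.toNat_natCast]
      have hr : 131071 &&& k < 2^17 := by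
        have : 131071 &&& k ≤ 131071 := Nat.and_le_left
        omega
      have htb : (131071 - (131071 &&& k)).testBit i = !(k.testBit i) := by
        have := pv_subComplTestBit 17 (131071 &&& k) hr i
        rw [← h17] at this
        rw [this]
        simp [Nat.testBit_and, hm i, hi]
      have h2 : 0 < 2^i := Nat.two_pow_pos i
      rw [hL, htb, hcast, pv_band_negSucc, Nat.two_pow_and]
      rcases hb : k.testBit i with _|_ <;> simp
      omega

-- unfolding one step of the peel loop on a positive value
theorem pv_peel_cons (m : Nat) (hm : 0 < m) :
    peelNames ↑m = (jlFlagDict.getD (PySem.Int.band ↑m (-↑m)) "") ::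
      peelNames (PySem.Int.band ↑m (↑m - 1)) := by
  rw [peelNames]
  rw [dif_neg (by exact_mod_cast Nat.not_le.mpr hm)]

-- the peel loop, started on a·2^i with a < 2^k and i+k = 17, yields the names of a's bits
theorem pv_peel (k : Nat) : ∀ (i a : Nat), i + k = 17 → a < 2^k →
    peelNames ↑(a * 2^i) =
      ((List.range' i k).filter (fun j => a.testBit (j - i))).map pvNameAt := by
  induction k with
  | zero =>
      intro i a _ ha
      interval_cases a
      simp [peelNames]
  | succ u ih =>
      intro i a hik ha
      have hrange : List.range' i (u+1) = i :: List.range' (i+1) u := List.range'_succ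
      have htail : ∀ b, b = a / 2 →
          (List.range' (i+1) u).filter (fun j => a.testBit (j - i)) =
          (List.range' (i+1) u).filter (fun j => b.testBit (j - (i+1))) := by
        intro b hb
        apply List.filter_congr
        intro j hj
        have hj' : i + 1 ≤ j := (List.mem_range'_1.mp hj).1
        have e : j - i = (j - (i+1)) + 1 := by omega
        rw [e, Nat.testBit_add_one, hb]
      by_cases hz : a = 0
      · subst hz
        simp [peelNames, Nat.zero_testBit]
      rcases Nat.even_or_odd a with he | ho
      · -- a even: same loop value, bit i unset
        obtain ⟨b, hb⟩ := he
        have hb2 : a = 2 * b := by omega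
        have hbd : b = a / 2 := by omega
        have hmv : a * 2^i = b * 2^(i+1) := by rw [hb2]; ring
        have hbit : a.testBit 0 = false := by
          rw [Nat.testBit_zero]; simp; omega
        rw [hmv, ih (i+1) b (by omega) (by
              have : (2:Nat)^(u+1) = 2*2^u := by ring
              omega)]
        rw [hrange, List.filter_cons]
        simp only [Nat.sub_self, hbit]
        rw [htail b hbd]
        simp
      · -- a odd: peel bit i, recurse on a/2 at position i+1
        have ha2 : a % 2 = 1 := Nat.odd_iff.mp ho
        have hpos : 0 < a * 2^i := Nat.mul_pos (by omega) (by positivity)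
        have hneg : -(↑(a * 2^i) : Int) = Int.negSucc (a * 2^i - 1) := by
          rw [Int.negSucc_eq]; push_cast [hpos]; omega
        have hsub1 : (↑(a * 2^i) : Int) - 1 = ↑(a * 2^i - 1) := by push_cast [hpos]; omega
        have hclr : (a * 2^i) &&& (a * 2^i - 1) = (a - 1) * 2^i := pv_clearLow i a ha2
        have hlow : PySem.Int.band ↑(a * 2^i) (-↑(a * 2^i)) = ↑(2^i : Nat) := by
          rw [hneg, pv_band_negSucc, hclr]
          congr 1
          rw [← Nat.sub_mul, show a - (a-1) = 1 by omega, one_mul]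
        have hnext : PySem.Int.band ↑(a * 2^i) (↑(a * 2^i) - 1) = ↑((a/2) * 2^(i+1)) := by
          rw [hsub1, PySem.Int.band_natCast, hclr]
          congr 1
          obtain ⟨q, hq⟩ : ∃ q, a = 2*q + 1 := ⟨a/2, by omega⟩
          subst hq
          rw [show (2*q+1)/2 = q by omega, show 2*q+1-1 = 2*q by omega, pow_succ]
          ring
        have hname : jlFlagDict.getD (↑(2^i : Nat)) "" = pvNameAt i := by
          have hi : i ≤ 16 := by omega
          interval_cases i <;> rfl
        have hbit : a.testBit 0 = true := by
          rw [Nat.testBit_zero]; simp; omega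
        rw [pv_peel_cons _ hpos, hlow, hname, hnext,
            ih (i+1) (a/2) (by omega) (by
              have : (2:Nat)^(u+1) = 2*2^u := by ring
              omega)]
        rw [hrange, List.filter_cons]
        simp only [Nat.sub_self, hbit]
        rw [htail (a/2) rfl]
        simp

-- filter-then-map over two lists that agree pointwise on test and projection
theorem pv_filter_map_congr {α β γ : Type} (f : α → γ) (g : β → γ) (p : α → Bool) (q : β → Bool)
    {l1 : List α} {l2 : List β}
    (h : List.Forall₂ (fun a b => p a = q b ∧ f a = g b) l1 l2) :
    (l1.filter p).map f = (l2.filter q).map g := by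
  induction h with
  | nil => rfl
  | cons hab hrest ih =>
      rcases hab with ⟨hc, hf⟩
      rw [List.filter_cons, List.filter_cons, hc]
      split_ifs with hq
      · simp [hf, ih]
      · exact ih

-- A's fold over the flag table is the bit-filtered name list
theorem pv_A (d : Int) : get_file_attr_flags d =
    PySem.Str.join "," (((List.range 17).filter (fun j => (pvLow17 d).testBit j)).map pvNameAt) := by
  unfold get_file_attr_flags
  rw [PySem.List.foldl_append_if, List.nil_append]
  show PySem.Str.join "," (List.map Prod.snd
      (List.filter (fun p => PySem.Int.band p.1 d == p.1) jlAttrFlags)) = _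
  congr 1
  have hC : ∀ i : Nat, i < 17 →
      (PySem.Int.band (2^i : Int) d == (2^i : Int)) = (pvLow17 d).testBit i := by
    intro i hi
    rw [Bool.eq_iff_iff, beq_iff_eq]
    exact pv_test d i hi
  have hr : List.range 17 = [0,1,2,3,4,5,6,7,8,9,10,11,12,13,14,15,16] := by decide
  rw [hr]
  apply pv_filter_map_congr Prod.snd pvNameAt
  unfold jlAttrFlags
  refine List.Forall₂.cons ⟨by simpa using hC 0 (by norm_num), rfl⟩ ?_
  refine List.Forall₂.cons ⟨by simpa using hC 1 (by norm_num), rfl⟩ ?_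
  refine List.Forall₂.cons ⟨by simpa using hC 2 (by norm_num), rfl⟩ ?_
  refine List.Forall₂.cons ⟨by simpa using hC 3 (by norm_num), rfl⟩ ?_
  refine List.Forall₂.cons ⟨by simpa using hC 4 (by norm_num), rfl⟩ ?_
  refine List.Forall₂.cons ⟨by simpa using hC 5 (by norm_num), rfl⟩ ?_
  refine List.Forall₂.cons ⟨by simpa using hC 6 (by norm_num), rfl⟩ ?_
  refine List.Forall₂.cons ⟨by simpa using hC 7 (by norm_num), rfl⟩ ?_
  refine List.Forall₂.cons ⟨by simpa using hC 8 (by norm_num), rfl⟩ ?_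
  refine List.Forall₂.cons ⟨by simpa using hC 9 (by norm_num), rfl⟩ ?_
  refine List.Forall₂.cons ⟨by simpa using hC 10 (by norm_num), rfl⟩ ?_
  refine List.Forall₂.cons ⟨by simpa using hC 11 (by norm_num), rfl⟩ ?_
  refine List.Forall₂.cons ⟨by simpa using hC 12 (by norm_num), rfl⟩ ?_
  refine List.Forall₂.cons ⟨by simpa using hC 13 (by norm_num), rfl⟩ ?_
  refine List.Forall₂.cons ⟨by simpa using hC 14 (by norm_num), rfl⟩ ?_
  refine List.Forall₂.cons ⟨by simpa using hC 15 (by norm_num), rfl⟩ ?_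
  refine List.Forall₂.cons ⟨by simpa using hC 16 (by norm_num), rfl⟩ ?_
  exact List.Forall₂.nil

-- B's masked peel loop is the same bit-filtered name list
theorem pv_B (d : Int) : get_file_attr_flags_alt d =
    PySem.Str.join "," (((List.range 17).filter (fun j => (pvLow17 d).testBit j)).map pvNameAt) := by
  unfold get_file_attr_flags_alt
  rw [show (0x1FFFF : Int) = 131071 from rfl, pv_low17_eq d]
  congr 1
  have h := pv_peel 17 0 (pvLow17 d) (by norm_num) (by simpa using pv_low17_lt d)
  simp only [pow_zero, mul_one] at h
  rw [h, List.range_eq_range']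
  simp

-- ===== VERDICT (by name: the statement is the Claim_ definition above) =====
theorem get_file_attr_flags_spec : Claim_equal_get_file_attr_flags := by
  intro d _hd
  unfold Spec_get_file_attr_flags
  rw [pv_A d, pv_B d]
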